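-- pv_equiv track=rewrite | github.com/Boyuridod/ExerciciosMaratona | Isamatdin and His Magic Wand.py | sorte
-- ===== SOURCE A (Python) =====
-- def sorte(l):
--     embaralhado = True
--
--     while(embaralhado):
--         embaralhado = False
--         for i in range(len(l)):
--             for j in range(i + 1, len(l)):
--                 if(l[i] > l[j]):
--                     if(l[i] & 1 != l[j] & 1):
--                         aux = l[i]
--                         l[i] = l[j]
--                         l[j] = aux
--
--                         embaralhado = True
--
--                         j = i
--                         i = len(l)
--
--                         break
--
--     return l
-- ===== SOURCE B (Python) =====
-- # Same greedy fixpoint as A (repeatedly sweep, each time swapping the current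
-- # element with the first smaller opposite-parity element to its right), but
-- # written as a head/tail pass over list values instead of index-based nested
-- # loops over a mutated array.  Return value only: A sorts its argument in
-- # place, B leaves it untouched.
-- def sorte(l):
--     xs = list(l)
--     changed = True
--     while changed:
--         changed = False
--         done = []
--         rest = xs
--         while rest:
--             x, rest = rest[0], rest[1:]
--             for k, y in enumerate(rest):
--                 if x > y and (x ^ y) & 1:
--                     rest[k] = x
--                     x = y
--                     changed = True
--                     break
--             done.append(x)
--         xs = done
--     return xs
-- ===== Notes on version B (the rewrite author's own statement) =====
-- stated objective: alternative
-- what changed: The index-based nested for-loops over a mutated array (with break/flag plumbing) are replaced by a head/tail pass that splits the list, finds the first qualifying partner in the tail by enumeration, and rebuilds the output list; the fixpoint iteration is kept but B never mutates its argument.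
import Mathlib
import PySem

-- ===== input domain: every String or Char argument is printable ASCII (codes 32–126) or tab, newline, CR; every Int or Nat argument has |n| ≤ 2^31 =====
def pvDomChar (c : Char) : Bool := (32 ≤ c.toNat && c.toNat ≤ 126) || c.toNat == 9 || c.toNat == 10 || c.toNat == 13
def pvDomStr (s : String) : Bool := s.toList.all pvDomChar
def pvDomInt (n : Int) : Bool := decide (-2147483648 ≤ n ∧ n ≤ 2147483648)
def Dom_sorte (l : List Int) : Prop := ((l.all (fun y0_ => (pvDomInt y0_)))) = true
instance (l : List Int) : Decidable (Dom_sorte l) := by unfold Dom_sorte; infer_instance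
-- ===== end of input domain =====

-- B rebuilds the result by a head/tail pass instead of A's index-based nested loops;
-- equivalence is about the RETURN value only (Python A sorts its argument in place, B does not).

-- ===== PORT A =====
-- inner 'for j in range(i+1, len(l))' loop: swap with the first qualifying j, break
def innerA (l : List Int) (i j : Nat) : List Int × Bool :=
  if _h : j < l.length then
    -- 'l[i] & 1 != l[j] & 1' ported as mod 2 (exact: Python's '& 1' on ints is the floor-mod by 2)
    if l.getD i 0 > l.getD j 0 ∧ PySem.Int.mod (l.getD i 0) 2 ≠ PySem.Int.mod (l.getD j 0) 2 then
      ((l.set i (l.getD j 0)).set j (l.getD i 0), true)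
    else innerA l i (j + 1)
  else (l, false)
termination_by l.length - j

-- outer 'for i in range(len(l))' loop, threading the 'embaralhado' flag
def outerA (n : Nat) (l : List Int) (i : Nat) (changed : Bool) : List Int × Bool :=
  if i < n then
    let p := innerA l i (i + 1)
    outerA n p.1 (i + 1) (changed || p.2)
  else (l, changed)
termination_by n - i

-- 'while(embaralhado)' loop; fuel n*n+1 exceeds the inversion count, so it never runs out
def loopA (fuel : Nat) (l : List Int) : List Int :=
  match fuel with
  | 0 => l
  | f + 1 =>
    let p := outerA l.length l 0 false
    if p.2 then loopA f p.1 else p.1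

def sorte (l : List Int) : List Int := loopA (l.length * l.length + 1) l

-- ===== PORT B =====
-- 'for k, y in enumerate(rest): …': first y in ys with x > y and opposite parity;
-- returns (y, ys with that y replaced by x)
def findSwap (x : Int) (ys : List Int) : Option (Int × List Int) :=
  match ys with
  | [] => none
  | y :: ys' =>
    if x > y ∧ PySem.Int.mod x 2 ≠ PySem.Int.mod y 2 then some (y, x :: ys')
    else (findSwap x ys').map (fun p => (p.1, y :: p.2))

-- termination helper for passB (cited by name in decreasing_by)
theorem findSwap_length (x : Int) (ys : List Int) (p : Int × List Int)
    (h : findSwap x ys = some p) : p.2.length = ys.length := by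
  induction ys generalizing p with
  | nil => simp [findSwap] at h
  | cons a t ih =>
    rw [findSwap] at h
    split at h
    · simp at h
      subst h
      simp
    · cases h' : findSwap x t with
      | none => simp [h'] at h
      | some q =>
        simp [h'] at h
        subst h
        simp [ih q h']

-- one pass of the 'while rest' loop: split head, swap with first partner, rebuild
def passB (xs : List Int) : Bool × List Int :=
  match xs with
  | [] => (false, [])
  | x :: rest =>
    match hfs : findSwap x rest with
    | some p => (true, p.1 :: (passB p.2).2)
    | none => let q := passB rest; (q.1, x :: q.2)
termination_by xs.length
decreasing_by
  · simp [findSwap_length x rest p hfs]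
  · simp

-- 'while changed' fixpoint loop, same fuel device
def loopB (fuel : Nat) (l : List Int) : List Int :=
  match fuel with
  | 0 => l
  | f + 1 =>
    let p := passB l
    if p.1 then loopB f p.2 else p.2

def sorte_alt (l : List Int) : List Int := loopB (l.length * l.length + 1) l

-- ===== PRECONDITION & SPEC =====
def Spec_sorte (l : List Int) (out : List Int) : Prop := out = sorte_alt l
instance (l : List Int) (out : List Int) : Decidable (Spec_sorte l out) := by unfold Spec_sorte; infer_instance

-- ===== CLAIM (what is proved, stated in full; the proofs are below) =====
def Claim_equal_sorte : Prop := ∀ (l : List Int), Dom_sorte l → Spec_sorte l (sorte l)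

-- ===== LEMMAS AND PROOFS =====

theorem getD_append_len (a : List Int) (x : Int) (t : List Int) :
    (a ++ x :: t).getD a.length 0 = x := by
  induction a with
  | nil => simp
  | cons b a ih => simpa using ih

theorem set_append_len (a : List Int) (x y : Int) (t : List Int) :
    (a ++ x :: t).set a.length y = a ++ y :: t := by
  induction a with
  | nil => simp
  | cons b a ih => simpa using ih

theorem inner_spec (done rs1 rs2 : List Int) (x : Int) :
    innerA (done ++ x :: (rs1 ++ rs2)) done.length (done.length + 1 + rs1.length) =
    match findSwap x rs2 with
    | some p => (done ++ p.1 :: (rs1 ++ p.2), true)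
    | none => (done ++ x :: (rs1 ++ rs2), false) := by
  induction rs2 generalizing rs1 with
  | nil =>
    rw [innerA]
    simp [findSwap]
    omega
  | cons y rs2' ih =>
    rw [innerA]
    have hlen : done.length + 1 + rs1.length < (done ++ x :: (rs1 ++ y :: rs2')).length := by
      simp; omega
    have hgi : (done ++ x :: (rs1 ++ y :: rs2')).getD done.length 0 = x := by
      simpa using getD_append_len done x (rs1 ++ y :: rs2')
    have hgj : (done ++ x :: (rs1 ++ y :: rs2')).getD (done.length + 1 + rs1.length) 0 = y := by
      have : done ++ x :: (rs1 ++ y :: rs2') = (done ++ x :: rs1) ++ y :: rs2' := by simp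
      rw [this]
      have := getD_append_len (done ++ x :: rs1) y rs2'
      simpa [Nat.add_assoc, Nat.add_comm, Nat.add_left_comm] using this
    rw [dif_pos hlen, hgi, hgj]
    by_cases hc : x > y ∧ PySem.Int.mod x 2 ≠ PySem.Int.mod y 2
    · rw [if_pos hc]
      rw [findSwap, if_pos hc]
      have h1 : (done ++ x :: (rs1 ++ y :: rs2')).set done.length y
          = done ++ y :: (rs1 ++ y :: rs2') := set_append_len done x y _
      have h2 : (done ++ y :: (rs1 ++ y :: rs2')).set (done.length + 1 + rs1.length) x
          = done ++ y :: (rs1 ++ x :: rs2') := by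
        have e : done ++ y :: (rs1 ++ y :: rs2') = (done ++ y :: rs1) ++ y :: rs2' := by simp
        have e2 : done ++ y :: (rs1 ++ x :: rs2') = (done ++ y :: rs1) ++ x :: rs2' := by simp
        rw [e, e2]
        have := set_append_len (done ++ y :: rs1) y x rs2'
        simpa [Nat.add_assoc, Nat.add_comm, Nat.add_left_comm] using this
      simp [h1, h2]
    · rw [if_neg hc]
      rw [findSwap, if_neg hc]
      have e : done ++ x :: (rs1 ++ y :: rs2') = done ++ x :: ((rs1 ++ [y]) ++ rs2') := by simp
      have ej : done.length + 1 + rs1.length + 1 = done.length + 1 + (rs1 ++ [y]).length := by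
        simp
        omega
      rw [e, ej, ih (rs1 ++ [y])]
      cases h' : findSwap x rs2' with
      | none => simp
      | some p => simp

theorem outer_spec (m : Nat) (rest done : List Int) (changed : Bool)
    (hm : rest.length = m) :
    outerA (done.length + rest.length) (done ++ rest) done.length changed =
    ((done ++ (passB rest).2, changed || (passB rest).1)) := by
  induction m generalizing rest done changed with
  | zero =>
    have : rest = [] := List.eq_nil_of_length_eq_zero hm
    subst this
    rw [outerA]
    simp [passB]
  | succ m ih =>
    cases rest with
    | nil => simp at hm
    | cons x rs =>
      rw [outerA]
      have hi : done.length < done.length + (x :: rs).length := by simp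
      rw [if_pos hi]
      have hinner := inner_spec done [] rs x
      simp only [List.nil_append, List.length_nil, Nat.add_zero] at hinner
      cases hfs : findSwap x rs with
      | some p =>
        rw [hfs] at hinner
        simp only [hinner]
        rw [passB, hfs]
        have hlen : p.2.length = rs.length := findSwap_length x rs p hfs
        have hrw : done ++ p.1 :: p.2 = (done ++ [p.1]) ++ p.2 := by simp
        have hn : done.length + (x :: rs).length = (done ++ [p.1]).length + p.2.length := by
          simp [hlen]
          omega
        have hi1 : done.length + 1 = (done ++ [p.1]).length := by simp
        rw [hrw, hn, hi1, ih p.2 (done ++ [p.1]) (changed || true) (by simp [hlen]; omega)]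
        simp
      | none =>
        rw [hfs] at hinner
        simp only [hinner]
        rw [passB, hfs]
        have hrw : done ++ x :: rs = (done ++ [x]) ++ rs := by simp
        have hn : done.length + (x :: rs).length = (done ++ [x]).length + rs.length := by
          simp
          omega
        have hi1 : done.length + 1 = (done ++ [x]).length := by simp
        rw [hrw, hn, hi1, ih rs (done ++ [x]) (changed || false) (by simpa using hm)]
        simp

theorem passA_eq (l : List Int) :
    outerA l.length l 0 false = (((passB l).2, (passB l).1)) := by
  have := outer_spec l.length l [] false rfl
  simpa using this

theorem loop_eq (fuel : Nat) (l : List Int) : loopA fuel l = loopB fuel l := by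
  induction fuel generalizing l with
  | zero => rfl
  | succ f ih =>
    rw [loopA, loopB]
    simp only [passA_eq l]
    by_cases h : (passB l).1 = true
    · simp [h, ih]
    · simp at h; simp [h]

-- ===== VERDICT (by name: the statement is the Claim_ definition above) =====
theorem sorte_spec : Claim_equal_sorte := by
  intro l _
  unfold Spec_sorte sorte sorte_alt
  exact loop_eq _ l
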